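-- pv_equiv track=rewrite | github.com/select766/codingame-othello | feature_check/unicode_send/make_decode_offset_table.py | make_decode_offset_table
-- ===== SOURCE A (Python) =====
-- def make_decode_offset_table(charset):
--     last_code_point = -2
--     span_first = -2
--     table = {}
--     for i, c in enumerate(charset):
--         code_point = ord(c)
--         assert code_point > last_code_point
--         if code_point > last_code_point + 1:
--             # 区間が切れている
--             # span_firstをspan_first_iに変換するオフセットが必要
--             if last_code_point >= 0:
--                 table[last_code_point] = span_first - span_first_i
--             span_first = code_point
--             span_first_i = i
--         last_code_point = code_point
--     upper_bound = 65536
--     table[upper_bound] = span_first - span_first_i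
--     return table
-- ===== SOURCE B (Python) =====
-- def make_decode_offset_table(charset):
--     code_points = [ord(c) for c in charset]
--     assert all(a < b for a, b in zip(code_points, code_points[1:]))
--     # partition into maximal runs of consecutive code points: (first_cp, first_idx, last_cp)
--     runs = []
--     for i, cp in enumerate(code_points):
--         if runs and cp == runs[-1][2] + 1:
--             runs[-1] = (runs[-1][0], runs[-1][1], cp)
--         else:
--             runs.append((cp, i, cp))
--     table = {}
--     for first, idx, last in runs[:-1]:
--         table[last] = first - idx
--     first, idx, _ = runs[-1]
--     table[65536] = first - idx
--     return table
-- ===== Notes on version B (the rewrite author's own statement) =====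
-- stated objective: alternative
-- what changed: B first validates monotonicity in one pass, then partitions the code points into maximal consecutive runs, and finally tabulates one offset entry per run, instead of A's single pass carrying last/span_first/span_first_i state and emitting entries at span breaks.
import Mathlib
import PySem

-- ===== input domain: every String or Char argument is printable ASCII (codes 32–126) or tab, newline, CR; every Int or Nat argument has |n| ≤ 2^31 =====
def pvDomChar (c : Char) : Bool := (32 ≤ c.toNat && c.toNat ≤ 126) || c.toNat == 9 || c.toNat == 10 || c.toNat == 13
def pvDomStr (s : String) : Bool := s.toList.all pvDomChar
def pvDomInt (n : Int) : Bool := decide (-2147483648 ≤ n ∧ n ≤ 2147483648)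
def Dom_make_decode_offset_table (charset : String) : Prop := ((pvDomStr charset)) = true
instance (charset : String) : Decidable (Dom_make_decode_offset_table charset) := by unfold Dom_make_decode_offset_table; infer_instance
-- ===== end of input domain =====

-- B restructures the computation (validate, group into maximal consecutive runs, tabulate);
-- same O(n) cost, different decomposition. Equality proved on Pre_ (nonempty, strictly
-- increasing charset); outside Pre_ the Python A raises (AssertionError / UnboundLocalError).

-- ===== PORT A =====
-- A's single loop: state (last_code_point, span_first, span_first_i, table); span_first_i is
-- Option since Python leaves it unbound until the first span starts. On an assert failure the
-- Python raises; such inputs are outside Pre_ (the port then just stops, returning its state).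
def pvALoop (l : List (Int × Char)) (last spanF : Int) (spanFI : Option Int)
    (table : PySem.Dict Int Int) : Int × Option Int × PySem.Dict Int Int :=
  match l with
  | [] => (spanF, spanFI, table)
  | (i, c) :: rest =>
    let cp : Int := (c.toNat : Int)
    if cp > last then
      if cp > last + 1 then
        let table' := if last ≥ 0 then table.insert last (spanF - spanFI.getD 0) else table
        pvALoop rest cp cp (some i) table'
      else
        pvALoop rest cp spanF spanFI table
    else (spanF, spanFI, table)  -- AssertionError in Python: outside Pre_

def make_decode_offset_table (charset : String) : List (Int × Int) :=
  let st := pvALoop (PySem.List.enumerate charset.toList) (-2) (-2) none PySem.Dict.empty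
  match st.2.1 with
  | some i => (st.2.2.insert 65536 (st.1 - i)).items
  | none => st.2.2.items  -- UnboundLocalError in Python (empty charset): outside Pre_

-- ===== PORT B =====
-- B's run grouping: runs of (first_cp, first_idx, last_cp), extending the final run or appending.
def pvBLoop (l : List (Int × Int)) (runs : List (Int × Int × Int)) : List (Int × Int × Int) :=
  match l with
  | [] => runs
  | (i, cp) :: rest =>
    match runs.getLast? with
    | some (f, fi, lastCp) =>
      if cp = lastCp + 1 then pvBLoop rest (runs.dropLast ++ [(f, fi, cp)])
      else pvBLoop rest (runs ++ [(cp, i, cp)])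
    | none => pvBLoop rest (runs ++ [(cp, i, cp)])

def make_decode_offset_table_alt (charset : String) : List (Int × Int) :=
  let codePoints : List Int := charset.toList.map (fun c => (c.toNat : Int))
  if (codePoints.zip codePoints.tail).all (fun p => p.1 < p.2) then
    let runs := pvBLoop (PySem.List.enumerate codePoints) []
    match runs.getLast? with
    | some (f, fi, _) =>
      let table := runs.dropLast.foldl
        (fun (t : PySem.Dict Int Int) (r : Int × Int × Int) => t.insert r.2.2 (r.1 - r.2.1))
        PySem.Dict.empty
      (table.insert 65536 (f - fi)).items
    | none => []  -- IndexError in Python (empty charset): outside Pre_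
  else []  -- AssertionError in Python: outside Pre_

-- ===== PRECONDITION & SPEC =====
-- Pre_ excludes exactly the inputs on which A raises: the empty string (UnboundLocalError on
-- span_first_i) and any charset whose code points are not strictly increasing (AssertionError).
def Pre_make_decode_offset_table (charset : String) : Prop :=
  charset.toList ≠ [] ∧ (charset.toList.zip charset.toList.tail).all (fun p => p.1.toNat < p.2.toNat) = true
instance (charset : String) : Decidable (Pre_make_decode_offset_table charset) := by
  unfold Pre_make_decode_offset_table; infer_instance
def pvWitness_make_decode_offset_table : String := "Zabc"

def Spec_make_decode_offset_table (charset : String) (out : List (Int × Int)) : Prop := out = make_decode_offset_table_alt charset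
instance (charset : String) (out : List (Int × Int)) : Decidable (Spec_make_decode_offset_table charset out) := by unfold Spec_make_decode_offset_table; infer_instance

-- ===== CLAIM (what is proved, stated in full; the proofs are below) =====
def Claim_equal_make_decode_offset_table : Prop := ∀ (charset : String), Dom_make_decode_offset_table charset → Pre_make_decode_offset_table charset → Spec_make_decode_offset_table charset (make_decode_offset_table charset)

-- ===== LEMMAS AND PROOFS =====

-- canonical table contents for a suffix, given the current run's (first, firstIdx, last)
def pvG (l : List (Int × Int)) (last f fi : Int) : List (Int × Int) :=
  match l with
  | [] => [(65536, f - fi)]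
  | (i, cp) :: rest =>
    if cp > last + 1 then (last, f - fi) :: pvG rest cp cp i
    else pvG rest cp f fi

-- strictly increasing code points, continuing from `last`
def pvIncI (last : Int) : List (Int × Int) → Prop
  | [] => True
  | p :: rest => last < p.2 ∧ pvIncI p.2 rest

def pvMapCp (l : List (Int × Char)) : List (Int × Int) := l.map (fun p => (p.1, (p.2.toNat : Int)))

def pvFinishA (st : Int × Option Int × PySem.Dict Int Int) : List (Int × Int) :=
  match st.2.1 with
  | some i => (st.2.2.insert 65536 (st.1 - i)).items
  | none => st.2.2.items

-- the runs list produced by pvBLoop, as a direct recursion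
def pvRuns (l : List (Int × Int)) (last f fi : Int) : List (Int × Int × Int) :=
  match l with
  | [] => [(f, fi, last)]
  | (i, cp) :: rest =>
    if cp = last + 1 then pvRuns rest cp f fi
    else (f, fi, last) :: pvRuns rest cp cp i

def pvEmit (t : PySem.Dict Int Int) (runs : List (Int × Int × Int)) : List (Int × Int) :=
  match runs.getLast? with
  | some (f, fi, _) =>
    ((runs.dropLast.foldl
      (fun (t : PySem.Dict Int Int) (r : Int × Int × Int) => t.insert r.2.2 (r.1 - r.2.1)) t).insert
      65536 (f - fi)).items
  | none => t.items

lemma pvRuns_ne_nil (l : List (Int × Int)) (last f fi : Int) : pvRuns l last f fi ≠ [] := by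
  induction l generalizing last f fi with
  | nil => simp [pvRuns]
  | cons p rest ih =>
    simp only [pvRuns]
    split
    · exact ih _ _ _
    · simp

lemma pvBLoop_append (l : List (Int × Int)) (rs rs' : List (Int × Int × Int)) (h : rs' ≠ []) :
    pvBLoop l (rs ++ rs') = rs ++ pvBLoop l rs' := by
  induction l generalizing rs' with
  | nil => simp [pvBLoop]
  | cons p rest ih =>
    obtain ⟨i, cp⟩ := p
    cases hg : rs'.getLast? with
    | none => exact absurd (List.getLast?_eq_none_iff.mp hg) h
    | some a =>
      obtain ⟨f, fi, lc⟩ := a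
      simp only [pvBLoop, List.getLast?_append_of_ne_nil rs h, hg]
      split_ifs
      · rw [List.dropLast_append_of_ne_nil h, List.append_assoc]
        exact ih _ (by simp)
      · rw [List.append_assoc]
        exact ih _ (by simp)

lemma pvBLoop_eq_pvRuns (l : List (Int × Int)) (last f fi : Int) :
    pvBLoop l [(f, fi, last)] = pvRuns l last f fi := by
  induction l generalizing last f fi with
  | nil => simp [pvBLoop, pvRuns]
  | cons p rest ih =>
    obtain ⟨i, cp⟩ := p
    simp only [pvBLoop, pvRuns, List.getLast?_singleton, List.dropLast_singleton]
    split
    · simpa using ih cp f fi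
    · rw [show [(f, fi, last)] ++ [(cp, i, cp)] = [(f, fi, last)] ++ [(cp, i, cp)] from rfl,
        pvBLoop_append rest [(f, fi, last)] [(cp, i, cp)] (by simp), ih]
      rfl

lemma pvFresh (t : PySem.Dict Int Int) (k last : Int) (hlt : ∀ k' ∈ t.keys, k' < last)
    (hk : last ≤ k) : t.contains k = false := by
  cases h : t.contains k with
  | false => rfl
  | true =>
    have := hlt k ((PySem.Dict.contains_iff_mem_keys t k).mp h)
    omega

lemma pvGetLast?_cons {α : Type} (x : α) (R : List α) (h : R ≠ []) :
    (x :: R).getLast? = R.getLast? := by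
  rw [show x :: R = [x] ++ R from rfl, List.getLast?_append_of_ne_nil _ h]

lemma pvEmit_pvRuns (l : List (Int × Int)) (last f fi : Int) (t : PySem.Dict Int Int)
    (hinc : pvIncI last l) (hlt : ∀ k ∈ t.keys, k < last) (hub : last < 65536)
    (hb : ∀ p ∈ l, p.2 < 65536) :
    pvEmit t (pvRuns l last f fi) = t.items ++ pvG l last f fi := by
  induction l generalizing last f fi t with
  | nil =>
    simp only [pvRuns, pvEmit, pvG, List.getLast?_singleton, List.dropLast_singleton,
      List.foldl_nil]
    exact PySem.Dict.items_insert_of_not_contains t _ (pvFresh t 65536 last hlt (by omega))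
  | cons p rest ih =>
    obtain ⟨i, cp⟩ := p
    obtain ⟨h1, h2⟩ := hinc
    have hbcp : cp < 65536 := hb (i, cp) (by simp)
    have hb' : ∀ q ∈ rest, q.2 < 65536 := fun q hq => hb q (by simp [hq])
    rw [pvRuns, pvG]
    by_cases hc : cp = last + 1
    · rw [if_pos hc, if_neg (by omega)]
      exact ih cp f fi t h2 (fun k hk => by have := hlt k hk; omega) hbcp hb'
    · rw [if_neg hc, if_pos (by omega)]
      have hR : pvRuns rest cp cp i ≠ [] := pvRuns_ne_nil rest cp cp i
      have hlt' : ∀ k ∈ (t.insert last (f - fi)).keys, k < cp := by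
        intro k hk
        rcases (PySem.Dict.mem_keys_insert t last k (f - fi)).mp hk with h | h
        · omega
        · have := hlt k h; omega
      have step := ih cp cp i (t.insert last (f - fi)) h2 hlt' hbcp hb'
      obtain ⟨⟨F, FI, L⟩, ha⟩ : ∃ a, (pvRuns rest cp cp i).getLast? = some a := by
        cases hg : (pvRuns rest cp cp i).getLast? with
        | none => exact absurd (List.getLast?_eq_none_iff.mp hg) hR
        | some a => exact ⟨a, rfl⟩
      rw [pvEmit] at step
      rw [pvEmit, pvGetLast?_cons _ _ hR, List.dropLast_cons_of_ne_nil hR]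
      simp only [ha, List.foldl_cons] at step ⊢
      rw [step, PySem.Dict.items_insert_of_not_contains t _ (pvFresh t last last hlt le_rfl)]
      simp

lemma pvALoop_spec (l : List (Int × Char)) (last f fi : Int) (t : PySem.Dict Int Int)
    (hinc : pvIncI last (pvMapCp l)) (h0 : 0 ≤ last) (hlt : ∀ k ∈ t.keys, k < last)
    (hub : last < 65536) (hb : ∀ p ∈ l, ((p.2.toNat : Int)) < 65536) :
    pvFinishA (pvALoop l last f (some fi) t) = t.items ++ pvG (pvMapCp l) last f fi := by
  induction l generalizing last f fi t with
  | nil =>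
    simp only [pvALoop, pvFinishA, pvMapCp, List.map_nil, pvG]
    exact PySem.Dict.items_insert_of_not_contains t _ (pvFresh t 65536 last hlt (by omega))
  | cons p rest ih =>
    obtain ⟨i, c⟩ := p
    have hmap : pvMapCp ((i, c) :: rest) = (i, ((c.toNat : Int))) :: pvMapCp rest := rfl
    rw [hmap] at hinc ⊢
    obtain ⟨h1, h2⟩ := hinc
    have hbcp : ((c.toNat : Int)) < 65536 := hb (i, c) (by simp)
    have hb' : ∀ q ∈ rest, ((q.2.toNat : Int)) < 65536 := fun q hq => hb q (by simp [hq])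
    rw [pvALoop, pvG]
    simp only [if_pos (show ((c.toNat : Int)) > last by omega)]
    by_cases hc : ((c.toNat : Int)) > last + 1
    · rw [if_pos hc, if_pos hc, if_pos h0]
      have step := ih ((c.toNat : Int)) ((c.toNat : Int)) i
        (t.insert last (f - (some fi).getD 0))
        h2 (by omega) ?_ hbcp hb'
      · rw [step, Option.getD_some,
          PySem.Dict.items_insert_of_not_contains t _ (pvFresh t last last hlt le_rfl)]
        simp
      · intro k hk
        rcases (PySem.Dict.mem_keys_insert t last k _).mp hk with h | h
        · omega
        · have := hlt k h; omega
    · rw [if_neg hc, if_neg hc]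
      exact ih _ f fi t h2 (by omega) (fun k hk => by have := hlt k hk; omega) hbcp hb' 

lemma pvEnum_map (g : Char → Int) (xs : List Char) (s : Int) :
    PySem.List.enumerate (xs.map g) s = (PySem.List.enumerate xs s).map (fun p => (p.1, g p.2)) := by
  induction xs generalizing s with
  | nil => simp [PySem.List.enumerate_nil]
  | cons c cs ih => simp [PySem.List.enumerate_cons, ih]

lemma pvInc_of_zip (c : Char) (cs : List Char) (s : Int)
    (h : (((c :: cs).zip cs).all (fun p => decide (p.1.toNat < p.2.toNat))) = true) :
    pvIncI (c.toNat : Int) (pvMapCp (PySem.List.enumerate cs s)) := by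
  induction cs generalizing c s with
  | nil => simp [PySem.List.enumerate_nil, pvMapCp, pvIncI]
  | cons c2 cs2 ih =>
    simp only [List.zip_cons_cons, List.all_cons, Bool.and_eq_true, decide_eq_true_eq] at h
    simp only [PySem.List.enumerate_cons, pvMapCp, List.map_cons, pvIncI]
    refine ⟨by exact_mod_cast h.1, ?_⟩
    exact ih c2 (s + 1) h.2

lemma pvSnd_mem_enumerate {α : Type} (xs : List α) (s : Int) (p : Int × α)
    (hp : p ∈ PySem.List.enumerate xs s) : p.2 ∈ xs := by
  have : p.2 ∈ (PySem.List.enumerate xs s).map (·.2) := List.mem_map_of_mem hp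
  rwa [PySem.List.map_snd_enumerate] at this

theorem make_decode_offset_table_spec : Claim_equal_make_decode_offset_table := by
  intro charset hdom hpre
  obtain ⟨hne, hsorted⟩ := hpre
  unfold Spec_make_decode_offset_table
  unfold Dom_make_decode_offset_table pvDomStr at hdom
  have hball : ∀ c ∈ charset.toList, ((c.toNat : Int)) < 65536 := by
    intro c hcmem
    have hd := List.all_eq_true.mp hdom c hcmem
    simp only [pvDomChar, Bool.or_eq_true, Bool.and_eq_true, decide_eq_true_eq,
      beq_iff_eq] at hd
    omega
  cases hc : charset.toList with
  | nil => exact absurd hc hne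
  | cons c0 cs =>
    rw [hc] at hsorted
    rw [List.tail_cons] at hsorted
    have h0le : (0 : Int) ≤ (c0.toNat : Int) := Int.natCast_nonneg _
    have hbub : ((c0.toNat : Int)) < 65536 := hball c0 (by rw [hc]; simp)
    have hbrest : ∀ p ∈ PySem.List.enumerate cs 1, ((p.2.toNat : Int)) < 65536 := by
      intro p hp
      exact hball p.2 (by rw [hc]; exact List.mem_cons_of_mem _ (pvSnd_mem_enumerate cs 1 p hp))
    have hincA : pvIncI ((c0.toNat : Int)) (pvMapCp (PySem.List.enumerate cs 1)) :=
      pvInc_of_zip c0 cs 1 hsorted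
    -- A-side reduction
    have hAv : make_decode_offset_table charset
        = pvG (pvMapCp (PySem.List.enumerate cs 1)) ((c0.toNat : Int)) ((c0.toNat : Int)) 0 := by
      have hA : make_decode_offset_table charset
          = pvFinishA (pvALoop (PySem.List.enumerate charset.toList) (-2) (-2) none
              PySem.Dict.empty) := rfl
      rw [hA, hc, PySem.List.enumerate_cons]
      rw [pvALoop]
      rw [if_pos (show ((c0.toNat : Int)) > -2 by omega),
        if_pos (show ((c0.toNat : Int)) > -2 + 1 by omega),
        if_neg (show ¬((-2 : Int) ≥ 0) by omega)]
      rw [show (0 : Int) + 1 = 1 from rfl]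
      rw [pvALoop_spec (PySem.List.enumerate cs 1) _ _ 0 PySem.Dict.empty hincA h0le
        (by intro k hk; simp at hk) hbub hbrest]
      rfl
    -- B-side reduction
    have hincB : pvIncI ((c0.toNat : Int))
        (PySem.List.enumerate (cs.map (fun c => ((c.toNat : Int)))) 1) := by
      rw [pvEnum_map]
      exact hincA
    have hbrestB : ∀ p ∈ PySem.List.enumerate (cs.map (fun c => ((c.toNat : Int)))) 1,
        p.2 < 65536 := by
      intro p hp
      have := pvSnd_mem_enumerate _ 1 p hp
      simp only [List.mem_map] at this
      obtain ⟨c, hcm, hgc⟩ := this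
      rw [← hgc]
      exact hball c (by rw [hc]; exact List.mem_cons_of_mem _ hcm)
    have hBv : make_decode_offset_table_alt charset
        = pvG (pvMapCp (PySem.List.enumerate cs 1)) ((c0.toNat : Int)) ((c0.toNat : Int)) 0 := by
      have hcond : ((((charset.toList.map (fun c => ((c.toNat : Int)))).zip
          (charset.toList.map (fun c => ((c.toNat : Int)))).tail).all
          (fun p => p.1 < p.2)) = true) := by
        rw [hc,
          show ((c0 :: cs).map (fun c => ((c.toNat : Int)))).tail
              = cs.map (fun c => ((c.toNat : Int))) from by simp,
          List.zip_map, List.all_map]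
        refine List.all_eq_true.mpr ?_
        intro q hq
        have := List.all_eq_true.mp hsorted q hq
        simp only [decide_eq_true_eq, Function.comp_apply, Prod.map_fst, Prod.map_snd] at this ⊢
        exact_mod_cast this
      rw [make_decode_offset_table_alt]
      rw [if_pos hcond]
      have hrunsEq : pvBLoop (PySem.List.enumerate
            (charset.toList.map (fun c => ((c.toNat : Int))))) []
          = pvRuns (PySem.List.enumerate (cs.map (fun c => ((c.toNat : Int)))) 1)
              ((c0.toNat : Int)) ((c0.toNat : Int)) 0 := by
        rw [hc, List.map_cons, PySem.List.enumerate_cons, pvBLoop]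
        simp only [List.getLast?_nil, List.nil_append]
        rw [show (0 : Int) + 1 = 1 from rfl]
        exact pvBLoop_eq_pvRuns _ _ _ _
      rw [hrunsEq]
      have hR := pvRuns_ne_nil (PySem.List.enumerate (cs.map (fun c => ((c.toNat : Int)))) 1)
        ((c0.toNat : Int)) ((c0.toNat : Int)) 0
      obtain ⟨⟨F, FI, L⟩, ha⟩ : ∃ a, (pvRuns (PySem.List.enumerate
          (cs.map (fun c => ((c.toNat : Int)))) 1)
          ((c0.toNat : Int)) ((c0.toNat : Int)) 0).getLast? = some a := by
        cases hg : (pvRuns _ _ _ _).getLast? with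
        | none => exact absurd (List.getLast?_eq_none_iff.mp hg) hR
        | some a => exact ⟨a, rfl⟩
      have hEmit := pvEmit_pvRuns (PySem.List.enumerate (cs.map (fun c => ((c.toNat : Int)))) 1)
        ((c0.toNat : Int)) ((c0.toNat : Int)) 0 PySem.Dict.empty hincB
        (by intro k hk; simp at hk) hbub hbrestB
      rw [pvEmit] at hEmit
      simp only [ha] at hEmit ⊢
      rw [hEmit]
      rw [pvEnum_map]
      rfl
    rw [hAv, hBv]
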